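-- pv_equiv track=rewrite | github.com/bildzeitung/adventofcode | 2019/16/1.py | phase
-- ===== SOURCE A (Python) =====
-- import math
-- from itertools import repeat, chain
--
-- BASE = [0, 1, 0, -1]
--
-- def phase(signal):
--     new_signal = []
--     for i in range(1, len(signal) + 1):
--         sequence = [y for y in chain.from_iterable(repeat(x, i) for x in BASE)]
--         n = math.ceil(max(0, (len(signal) - len(sequence) + 1)) / len(sequence))
--         new_signal.append(
--             abs(sum(a * b for a, b in zip(signal, sequence[1:] + sequence * n))) % 10
--         )
--     return new_signal
-- ===== SOURCE B (Python) =====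
-- from itertools import accumulate
--
-- def phase(sig):
--     # Prefix sums + per-output block range queries: output i sums its whole
--     # +1 / -1 blocks of length i via prefix-sum differences.
--     n = len(sig)
--     prefix = list(accumulate(sig, initial=0))
--     out = []
--     for i in range(1, n + 1):
--         total = 0
--         sign = 1
--         start = i - 1
--         while start < n:
--             total += sign * (prefix[min(start + i, n)] - prefix[start])
--             sign = -sign
--             start += 2 * i
--         out.append(abs(total) % 10)
--     return out
-- ===== Notes on version B (the rewrite author's own statement) =====
-- stated objective: faster
-- what changed: Replaces building the repeated +1/0/-1 pattern and a full dot product per output with one prefix-sum array and per-output summation of the contiguous +1/-1 blocks via range queries.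
import Mathlib
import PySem

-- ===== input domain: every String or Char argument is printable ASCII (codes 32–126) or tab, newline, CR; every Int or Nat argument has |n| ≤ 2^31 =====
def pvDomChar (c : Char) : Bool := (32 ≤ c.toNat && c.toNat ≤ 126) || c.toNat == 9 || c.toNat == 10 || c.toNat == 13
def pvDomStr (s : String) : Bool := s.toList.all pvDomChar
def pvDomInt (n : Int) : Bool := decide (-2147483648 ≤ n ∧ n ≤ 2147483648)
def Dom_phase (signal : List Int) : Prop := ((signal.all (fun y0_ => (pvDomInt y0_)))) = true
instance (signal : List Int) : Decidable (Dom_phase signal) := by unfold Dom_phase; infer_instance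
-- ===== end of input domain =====

-- B replaces the per-output repeated-pattern dot product with one prefix-sum array and
-- contiguous +1/-1 block range queries (measured asymptotically faster).

-- ===== PORT A =====
-- One output element: builds the repeated base pattern, repeats it enough times, dot product.
-- math.ceil(max(0,·)/len) is ported as exact ceiling division on Nat (numerator is nonnegative;
-- exact for these magnitudes, where Python's float division is exact enough for its ceil).
def phaseRow (signal : List Int) (i : Nat) : Int :=
  let seq := [(0 : Int), 1, 0, -1].flatMap (fun x => List.replicate i x)
  let m := (signal.length + 1 - seq.length + seq.length - 1) / seq.length
  let coeffs := seq.drop 1 ++ (List.replicate m seq).flatten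
  PySem.Int.mod |(List.zipWith (· * ·) signal coeffs).sum| 10

def phase (signal : List Int) : List Int :=
  (List.range signal.length).map (fun k => phaseRow signal (k + 1))

-- ===== PORT B =====
-- while start < n: add sign * (prefix[min(start+i,n)] - prefix[start]); fuel n+1 only makes the
-- recursion structural (start grows by 2*i ≥ 2 each pass, so fuel never runs out while start < n).
def rowLoop (P : List Int) (n i : Nat) : Nat → Nat → Int → Int → Int
  | 0, _, _, total => total
  | fuel + 1, start, sign, total =>
    if start < n then
      rowLoop P n i fuel (start + 2 * i) (-sign)
        (total + sign * (P.getD (min (start + i) n) 0 - P.getD start 0))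
    else total

-- prefix = list(accumulate(signal, initial=0)) is List.scanl (·+·) 0 signal
def phase_alt (signal : List Int) : List Int :=
  let n := signal.length
  let pref := List.scanl (· + ·) 0 signal
  (List.range n).map (fun k => PySem.Int.mod |rowLoop pref n (k + 1) (n + 1) k 1 0| 10)

-- ===== PRECONDITION & SPEC =====
def Spec_phase (signal : List Int) (out : List Int) : Prop := out = phase_alt signal
instance (signal : List Int) (out : List Int) : Decidable (Spec_phase signal out) := by unfold Spec_phase; infer_instance

-- ===== CLAIM (what is proved, stated in full; the proofs are below) =====
def Claim_equal_phase : Prop := ∀ (signal : List Int), Dom_phase signal → Spec_phase signal (phase signal)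

-- ===== LEMMAS AND PROOFS =====

-- coefficient of signal[j] in output i (1-based i): BASE[((j+1)/i) % 4]
def cf (i j : Nat) : Int := [(0 : Int), 1, 0, -1].getD (((j + 1) / i) % 4) 0

lemma flatMap_replicate_getD (L : List Int) (i : Nat) :
    ∀ p, p < L.length * i →
      (L.flatMap (fun x => List.replicate i x)).getD p 0 = L.getD (p / i) 0 := by
  induction L with
  | nil => intro p hp; simp at hp
  | cons x L ih =>
    intro p hp
    simp only [List.length_cons, Nat.succ_mul] at hp
    have hi : 0 < i := by
      rcases Nat.eq_zero_or_pos i with h0 | h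
      · subst h0; simp at hp
      · exact h
    simp only [List.flatMap_cons]
    by_cases hpi : p < i
    · rw [List.getD_append _ _ _ _ (by simpa using hpi), List.getD_replicate _ hpi,
        Nat.div_eq_of_lt hpi, List.getD_cons_zero]
    · rw [Nat.not_lt] at hpi
      rw [List.getD_append_right _ _ _ _ (by simpa using hpi)]
      have h1 : (List.replicate i x).length = i := by simp
      rw [h1, ih (p - i) (by omega)]
      have hdiv : p / i = (p - i) / i + 1 := by
        conv_lhs => rw [show p = (p - i) + i by omega]
        rw [Nat.add_div_right _ hi]
      rw [hdiv, List.getD_cons_succ]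

lemma flatten_replicate_getD (l : List Int) (m : Nat) :
    ∀ q, q < m * l.length →
      (List.replicate m l).flatten.getD q 0 = l.getD (q % l.length) 0 := by
  induction m with
  | zero => intro q hq; simp at hq
  | succ m ih =>
    intro q hq
    simp only [Nat.succ_mul] at hq
    simp only [List.replicate_succ, List.flatten_cons]
    by_cases hql : q < l.length
    · rw [List.getD_append _ _ _ _ hql, Nat.mod_eq_of_lt hql]
    · rw [Nat.not_lt] at hql
      rw [List.getD_append_right _ _ _ _ hql, ih (q - l.length) (by omega),
        Nat.mod_eq_sub_mod hql]

lemma period_div (i x : Nat) (hi : 0 < i) : (x / i) % 4 = (x % (4 * i)) / i := by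
  have h4i : 0 < 4 * i := by omega
  have hd := Nat.div_add_mod x (4 * i)
  have hr : x % (4 * i) < 4 * i := Nat.mod_lt _ h4i
  set t := x / (4 * i)
  set r := x % (4 * i)
  have hx : x = i * (4 * t) + r := by
    have hassoc : i * (4 * t) = 4 * i * t := by ring
    omega
  rw [hx, Nat.mul_add_div hi]
  have hri : r / i < 4 := by
    rw [Nat.div_lt_iff_lt_mul hi]; omega
  rw [Nat.mul_add_mod, Nat.mod_eq_of_lt hri]

-- the j-th coefficient A zips against is cf i j
lemma coeffs_getD (i m j : Nat) (hi : 0 < i) (hj : j < 4 * i - 1 + m * (4 * i)) :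
    ((([(0 : Int), 1, 0, -1].flatMap (fun x => List.replicate i x)).drop 1 ++
      (List.replicate m ([(0 : Int), 1, 0, -1].flatMap (fun x => List.replicate i x))).flatten).getD j 0)
      = cf i j := by
  set seq := [(0 : Int), 1, 0, -1].flatMap (fun x => List.replicate i x) with hseq
  have hlen : seq.length = 4 * i := by simp [hseq, List.flatMap_cons]; omega
  by_cases hsmall : j < 4 * i - 1
  · rw [List.getD_append _ _ _ _ (by simp [hlen]; omega)]
    have hdropD : (seq.drop 1).getD j 0 = seq.getD (j + 1) 0 := by
      simp [List.getD_eq_getElem?_getD]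
    rw [hdropD, flatMap_replicate_getD _ _ _ (by simp; omega)]
    have hdivlt : (j + 1) / i < 4 := by rw [Nat.div_lt_iff_lt_mul hi]; omega
    rw [cf, Nat.mod_eq_of_lt hdivlt]
  · rw [Nat.not_lt] at hsmall
    rw [List.getD_append_right _ _ _ _ (by simp [hlen]; omega)]
    have hdl : (seq.drop 1).length = 4 * i - 1 := by simp [hlen]
    rw [hdl, flatten_replicate_getD _ _ _ (by rw [hlen]; omega)]
    rw [hlen, flatMap_replicate_getD _ _ _ (by simp; have := Nat.mod_lt (j - (4 * i - 1)) (show 0 < 4*i by omega); omega)]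
    have hx : j + 1 = (j - (4 * i - 1)) + 4 * i := by omega
    rw [cf, hx, period_div _ _ hi]
    have : ((j - (4 * i - 1)) + 4 * i) % (4 * i) = (j - (4 * i - 1)) % (4 * i) := by
      simp [Nat.add_mod_right]
    rw [this]

-- A's repetition count makes the coefficient list at least as long as the signal
lemma coeffs_long (n i : Nat) (hi : 0 < i) :
    n ≤ 4 * i - 1 + ((n + 1 - 4 * i + 4 * i - 1) / (4 * i)) * (4 * i) := by
  by_cases h : n + 1 ≤ 4 * i
  · omega
  · rw [Nat.not_le] at h
    set a := n + 1 - 4 * i with ha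
    set m := (a + 4 * i - 1) / (4 * i) with hm
    have hd := Nat.div_add_mod (a + 4 * i - 1) (4 * i)
    have hr : (a + 4 * i - 1) % (4 * i) < 4 * i := Nat.mod_lt _ (by omega)
    rw [← hm] at hd
    have hcomm : m * (4 * i) = 4 * i * m := Nat.mul_comm m (4 * i)
    omega

lemma zip_sum (s : List Int) :
    ∀ t : List Int, s.length ≤ t.length →
      (List.zipWith (· * ·) s t).sum = ∑ j ∈ Finset.range s.length, s.getD j 0 * t.getD j 0 := by
  induction s with
  | nil => intro t _; simp
  | cons x s ih =>
    intro t ht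
    cases t with
    | nil => simp at ht
    | cons y t =>
      simp only [List.zipWith_cons_cons, List.sum_cons, List.length_cons]
      rw [ih t (by simpa using ht), Finset.sum_range_succ']
      simp only [List.getD_cons_succ, List.getD_cons_zero]
      ring

lemma scanl_getD (s : List Int) :
    ∀ (a : Int) (k : Nat), k ≤ s.length →
      (List.scanl (· + ·) a s).getD k 0 = a + ∑ j ∈ Finset.range k, s.getD j 0 := by
  induction s with
  | nil =>
    intro a k hk
    simp only [List.length_nil, Nat.le_zero] at hk
    subst hk
    simp
  | cons x s ih =>
    intro a k hk
    cases k with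
    | zero => simp
    | succ k =>
      simp only [List.scanl_cons, List.getD_cons_succ]
      rw [ih (a + x) k (by simpa using hk), Finset.sum_range_succ']
      simp only [List.getD_cons_succ, List.getD_cons_zero]
      ring

lemma prefix_diff (s : List Int) (a b : Nat) (hab : a ≤ b) (hb : b ≤ s.length) :
    (List.scanl (· + ·) 0 s).getD b 0 - (List.scanl (· + ·) 0 s).getD a 0
      = ∑ j ∈ Finset.Ico a b, s.getD j 0 := by
  rw [scanl_getD s 0 b hb, scanl_getD s 0 a (by omega), Finset.sum_Ico_eq_sub _ hab]
  ring

lemma cf_low (i j : Nat) (h : j + 1 < i) : cf i j = 0 := by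
  rw [cf, Nat.div_eq_of_lt h]; rfl

lemma cf_plus (i k j : Nat) (h1 : i * (2 * k + 1) ≤ j + 1) (h2 : j + 1 < i * (2 * k + 2)) :
    cf i j = (-1 : Int) ^ k := by
  have hd : (j + 1) / i = 2 * k + 1 :=
    Nat.div_eq_of_lt_le (by rw [Nat.mul_comm]; omega) (by rw [Nat.mul_comm]; omega)
  rw [cf, hd]
  rcases Nat.even_or_odd k with he | ho
  · obtain ⟨u, hu⟩ := he
    have h4 : (2 * k + 1) % 4 = 1 := by omega
    rw [h4, Even.neg_one_pow ⟨u, hu⟩]; rfl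
  · obtain ⟨u, hu⟩ := ho
    have h4 : (2 * k + 1) % 4 = 3 := by omega
    rw [h4, Odd.neg_one_pow ⟨u, hu⟩]; rfl

lemma cf_zero (i k j : Nat) (h1 : i * (2 * k + 2) ≤ j + 1) (h2 : j + 1 < i * (2 * k + 3)) :
    cf i j = 0 := by
  have hd : (j + 1) / i = 2 * k + 2 :=
    Nat.div_eq_of_lt_le (by rw [Nat.mul_comm]; omega) (by rw [Nat.mul_comm]; omega)
  rw [cf, hd]
  rcases Nat.even_or_odd k with he | ho
  · obtain ⟨u, hu⟩ := he
    have h4 : (2 * k + 2) % 4 = 2 := by omega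
    rw [h4]; rfl
  · obtain ⟨u, hu⟩ := ho
    have h4 : (2 * k + 2) % 4 = 0 := by omega
    rw [h4]; rfl

lemma rowLoop_sum (s : List Int) (i : Nat) (hi : 0 < i) :
    ∀ (fuel k : Nat) (total : Int),
      s.length ≤ i - 1 + 2 * i * k + 2 * fuel →
      rowLoop (List.scanl (· + ·) 0 s) s.length i fuel (i - 1 + 2 * i * k) ((-1) ^ k) total
        = total + ∑ j ∈ Finset.Ico (i - 1 + 2 * i * k) s.length, s.getD j 0 * cf i j := by
  intro fuel
  induction fuel with
  | zero =>
    intro k total hf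
    rw [rowLoop, Finset.Ico_eq_empty (by omega)]
    simp
  | succ fuel ih =>
    intro k total hf
    have hmul : 2 * i * (k + 1) = 2 * i * k + 2 * i := by ring
    set n := s.length with hn
    set start := i - 1 + 2 * i * k with hstart
    rw [rowLoop]
    by_cases hlt : start < n
    · simp only [if_pos hlt]
      have hstep : start + 2 * i = i - 1 + 2 * i * (k + 1) := by omega
      have hsign : -(-1 : Int) ^ k = (-1) ^ (k + 1) := by ring
      rw [hstep, hsign, ih (k + 1) _ (by omega)]
      set e := min (start + i) n with he
      set m2 := min (start + 2 * i) n with hm2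
      have h1 : start ≤ e := by omega
      have h2 : e ≤ m2 := by omega
      have h3 : m2 ≤ n := by omega
      have hA : i * (2 * k + 1) = 2 * i * k + i := by ring
      have hB : i * (2 * k + 2) = 2 * i * k + 2 * i := by ring
      have hC : i * (2 * k + 3) = 2 * i * k + 3 * i := by ring
      have hs1 := Finset.sum_Ico_consecutive (fun j => s.getD j 0 * cf i j) h1 h2
      have hs2 := Finset.sum_Ico_consecutive (fun j => s.getD j 0 * cf i j) (le_trans h1 h2) h3
      have hIcoTail : Finset.Ico m2 n = Finset.Ico (i - 1 + 2 * i * (k + 1)) n := by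
        by_cases hc : start + 2 * i ≤ n
        · rw [hm2, min_eq_left hc, hstep]
        · rw [Finset.Ico_eq_empty (by omega), Finset.Ico_eq_empty (by omega)]
      have hblockP : ∑ j ∈ Finset.Ico start e, s.getD j 0 * cf i j
          = (-1 : Int) ^ k * ((List.scanl (· + ·) 0 s).getD e 0 - (List.scanl (· + ·) 0 s).getD start 0) := by
        rw [prefix_diff s start e h1 (by omega), Finset.mul_sum]
        apply Finset.sum_congr rfl
        intro j hj
        rw [Finset.mem_Ico] at hj
        rw [cf_plus i k j (by omega) (by omega)]
        ring
      have hblockZ : ∑ j ∈ Finset.Ico e m2, s.getD j 0 * cf i j = 0 := by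
        apply Finset.sum_eq_zero
        intro j hj
        rw [Finset.mem_Ico] at hj
        rw [cf_zero i k j (by omega) (by omega)]
        ring
      rw [← hs2, ← hs1, ← hIcoTail, hblockP, hblockZ]
      ring
    · simp only [if_neg hlt]
      rw [Finset.Ico_eq_empty (by omega)]
      simp

-- B's row equals the coefficient-sum formula
lemma row_alt_eq (s : List Int) (k : Nat) (hk : k < s.length) :
    rowLoop (List.scanl (· + ·) 0 s) s.length (k + 1) (s.length + 1) k 1 0
      = ∑ j ∈ Finset.range s.length, s.getD j 0 * cf (k + 1) j := by
  have h := rowLoop_sum s (k + 1) (Nat.succ_pos k) (s.length + 1) 0 0 (by omega)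
  have hstart : (k + 1) - 1 + 2 * (k + 1) * 0 = k := by omega
  rw [hstart] at h
  rw [pow_zero] at h
  rw [zero_add] at h
  rw [h, Finset.range_eq_Ico,
    ← Finset.sum_Ico_consecutive (fun j => s.getD j 0 * cf (k + 1) j) (Nat.zero_le k) (le_of_lt hk)]
  have hlow : ∑ j ∈ Finset.Ico 0 k, s.getD j 0 * cf (k + 1) j = 0 := by
    apply Finset.sum_eq_zero
    intro j hj
    rw [Finset.mem_Ico] at hj
    rw [cf_low (k + 1) j (by omega)]
    ring
  rw [hlow, zero_add]

-- A's row equals the coefficient-sum formula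
lemma row_a_eq (s : List Int) (i : Nat) (hi : 0 < i) :
    phaseRow s i = PySem.Int.mod |∑ j ∈ Finset.range s.length, s.getD j 0 * cf i j| 10 := by
  rw [phaseRow]
  set seq := [(0 : Int), 1, 0, -1].flatMap (fun x => List.replicate i x) with hseq
  have hlen : seq.length = 4 * i := by simp [hseq, List.flatMap_cons]; omega
  set m := (s.length + 1 - seq.length + seq.length - 1) / seq.length with hm
  set coeffs := seq.drop 1 ++ (List.replicate m seq).flatten with hco
  have hclen : coeffs.length = 4 * i - 1 + m * (4 * i) := by
    simp [hco, hlen]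
  have hm' : m = (s.length + 1 - 4 * i + 4 * i - 1) / (4 * i) := by rw [hm, hlen]
  have hlong : s.length ≤ coeffs.length := by
    rw [hclen, hm']; exact coeffs_long s.length i hi
  rw [zip_sum s coeffs hlong]
  congr 1
  congr 1
  apply Finset.sum_congr rfl
  intro j hj
  rw [Finset.mem_range] at hj
  rw [hco, hseq, coeffs_getD i m j hi (by omega)]

-- ===== VERDICT (by name: the statement is the Claim_ definition above) =====
theorem phase_spec : Claim_equal_phase := by
  intro signal _
  unfold Spec_phase phase phase_alt
  apply List.map_congr_left
  intro k hk
  rw [List.mem_range] at hk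
  rw [row_a_eq signal (k + 1) (Nat.succ_pos k), row_alt_eq signal k hk]
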